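-- pv_equiv track=rewrite | github.com/Omochice/covid_plylo_with_lphist | src/utils.py | taxon_cmp
-- ===== SOURCE A (Python) =====
-- from itertools import product
--
-- def taxon_cmp(a: str, b: str) -> int:
--     prefixes = ("super", "", "sub", "infra", "parv")
--     suffixes = ("kingdom", "phylum", "class", "cohort", "order", "family",
--                 "tribe", "genus", "species")
--     sortlist = {}
--     for i, (suf, pre) in enumerate(product(suffixes, prefixes)):
--         sortlist[pre + suf] = i
--
--     if a == b:
--         return 0
--     elif sortlist.get(a, -1) < sortlist.get(b, -1):
--         return -1
--     else:
--         return 1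
-- ===== SOURCE B (Python) =====
-- def _rank(name: str) -> int:
--     prefixes = ("super", "", "sub", "infra", "parv")
--     suffixes = ("kingdom", "phylum", "class", "cohort", "order", "family",
--                 "tribe", "genus", "species")
--     for si, suf in enumerate(suffixes):
--         if name.endswith(suf):
--             stem = name[:-len(suf)]
--             if stem in prefixes:
--                 return si * 5 + prefixes.index(stem)
--     return -1
--
--
-- def taxon_cmp(a: str, b: str) -> int:
--     if a == b:
--         return 0
--     return -1 if _rank(a) < _rank(b) else 1
-- ===== Notes on version B (the rewrite author's own statement) =====
-- stated objective: simpler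
-- what changed: B drops A's precomputed 45-entry rank dictionary and instead parses each name (endswith one of the 9 suffixes, remainder one of the 5 prefixes) to compute its rank arithmetically as suffix_index*5 + prefix_index.
import Mathlib
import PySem

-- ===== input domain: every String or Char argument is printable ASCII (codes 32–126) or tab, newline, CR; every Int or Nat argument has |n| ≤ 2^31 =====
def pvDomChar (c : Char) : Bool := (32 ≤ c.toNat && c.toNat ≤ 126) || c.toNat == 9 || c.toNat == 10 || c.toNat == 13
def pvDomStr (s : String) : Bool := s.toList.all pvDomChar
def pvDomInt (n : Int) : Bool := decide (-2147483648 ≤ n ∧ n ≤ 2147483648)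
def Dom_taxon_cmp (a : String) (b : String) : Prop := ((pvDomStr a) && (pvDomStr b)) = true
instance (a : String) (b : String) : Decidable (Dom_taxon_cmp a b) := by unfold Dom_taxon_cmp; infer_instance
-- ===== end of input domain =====

-- B replaces A's precomputed 45-entry rank dictionary with a suffix/prefix parse of each
-- name that computes the rank arithmetically (objective: simpler, no table to build).

-- ===== PORT A =====
-- A builds sortlist = {pre+suf : i} over product(suffixes, prefixes), then compares lookups.
def taxon_cmp (a : String) (b : String) : Int :=
  let prefixes : List String := ["super", "", "sub", "infra", "parv"]
  let suffixes : List String := ["kingdom", "phylum", "class", "cohort", "order", "family",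
                                 "tribe", "genus", "species"]
  let sortlist : PySem.Dict String Int :=
    (PySem.List.enumerate (suffixes.flatMap (fun suf => prefixes.map (fun pre => (suf, pre))))).foldl
      (fun d ip => d.insert (ip.2.2 ++ ip.2.1) ip.1) PySem.Dict.empty
  if a = b then 0
  else if sortlist.getD a (-1) < sortlist.getD b (-1) then -1
  else 1

-- ===== PORT B =====
def tcAltPrefixes : List String := ["super", "", "sub", "infra", "parv"]

def tcAltSuffixes : List String := ["kingdom", "phylum", "class", "cohort", "order", "family",
                                    "tribe", "genus", "species"]

-- the `for si, suf in enumerate(suffixes)` loop of B's _rank, with early return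
def tcAltRankLoop (name : String) : Nat → List String → Int
  | _, [] => -1
  | si, suf :: rest =>
    if PySem.Str.endswith name suf then
      let stem := PySem.Str.slice name none (some (-(PySem.Str.len suf)))  -- name[:-len(suf)]
      match PySem.List.index? tcAltPrefixes stem with                      -- stem in prefixes / .index(stem)
      | some pi => (si : Int) * 5 + (pi : Int)
      | none => tcAltRankLoop name (si + 1) rest
    else tcAltRankLoop name (si + 1) rest

def tcAltRank (name : String) : Int := tcAltRankLoop name 0 tcAltSuffixes

def taxon_cmp_alt (a : String) (b : String) : Int :=
  if a = b then 0
  else if tcAltRank a < tcAltRank b then -1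
  else 1

-- ===== PRECONDITION & SPEC =====
def Spec_taxon_cmp (a : String) (b : String) (out : Int) : Prop := out = taxon_cmp_alt a b
instance (a : String) (b : String) (out : Int) : Decidable (Spec_taxon_cmp a b out) := by unfold Spec_taxon_cmp; infer_instance

-- ===== CLAIM (what is proved, stated in full; the proofs are below) =====
def Claim_equal_taxon_cmp : Prop := ∀ (a : String) (b : String), Dom_taxon_cmp a b → Spec_taxon_cmp a b (taxon_cmp a b)

-- ===== LEMMAS AND PROOFS =====
set_option maxRecDepth 4000

-- A's dictionary as a closed term (identical to the `let sortlist` inside taxon_cmp)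
def pvSortlist : PySem.Dict String Int :=
  (PySem.List.enumerate ((["kingdom", "phylum", "class", "cohort", "order", "family",
                           "tribe", "genus", "species"] : List String).flatMap
      (fun suf => (["super", "", "sub", "infra", "parv"] : List String).map (fun pre => (suf, pre))))).foldl
    (fun d ip => d.insert (ip.2.2 ++ ip.2.1) ip.1) PySem.Dict.empty

-- the 45 recognised rank names, in A's insertion order
def pvNames : List String :=
  tcAltSuffixes.flatMap (fun suf => tcAltPrefixes.map (fun pre => pre ++ suf))

theorem taxon_cmp_eq (a b : String) :
    taxon_cmp a b =
      if a = b then 0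
      else if pvSortlist.getD a (-1) < pvSortlist.getD b (-1) then -1
      else 1 := rfl

theorem pvSortlist_keys : pvSortlist.items.map Prod.fst = pvNames := by decide

theorem getD_mk_of_not_mem (l : List (String × Int)) (x : String)
    (h : x ∉ l.map Prod.fst) : (PySem.Dict.mk l).getD x (-1) = -1 := by
  induction l with
  | nil => rfl
  | cons kv t ih =>
    simp only [List.map_cons, List.mem_cons, not_or] at h
    rw [PySem.Dict.getD_eq_get?_getD, PySem.Dict.get?_mk_cons,
        if_neg (by simp only [beq_iff_eq]; exact fun e => h.1 e.symm), ← PySem.Dict.getD_eq_get?_getD]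
    exact ih h.2

theorem lookup_of_not_mem (x : String) (hx : x ∉ pvNames) :
    pvSortlist.getD x (-1) = -1 := by
  have h : x ∉ pvSortlist.items.map Prod.fst := by rw [pvSortlist_keys]; exact hx
  exact getD_mk_of_not_mem pvSortlist.items x h

theorem rankLoop_none (x : String) (sufs : List String) (si : Nat)
    (h : ∀ suf ∈ sufs, suf.toList ≠ [] ∧ ∀ pre ∈ tcAltPrefixes, x ≠ pre ++ suf) :
    tcAltRankLoop x si sufs = -1 := by
  induction sufs generalizing si with
  | nil => rfl
  | cons suf rest ih =>
    have hsuf := h suf (List.mem_cons_self ..)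
    have hrest : ∀ s ∈ rest, s.toList ≠ [] ∧ ∀ pre ∈ tcAltPrefixes, x ≠ pre ++ s :=
      fun s hs => h s (List.mem_cons_of_mem _ hs)
    by_cases hend : PySem.Str.endswith x suf = true
    · -- x ends with suf, but the stem is not a prefix: the branch falls through
      have hsfx : suf.toList <:+ x.toList := by
        rw [PySem.Str.endswith_eq] at hend
        exact (PySem.Chars.endswith_iff _ _).mp hend
      obtain ⟨p, hp⟩ := hsfx
      have hk : 0 < suf.toList.length := List.length_pos_of_ne_nil hsuf.1
      have hstem : (PySem.Str.slice x none (some (-(PySem.Str.len suf)))).toList = p := by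
        rw [PySem.Str.toList_slice]
        simp only [PySem.Chars.slice, PySem.Str.len_eq]
        rw [PySem.List.slice_to_neg_natCast _ _ hk, ← hp]
        simp
      have hidx : PySem.List.index? tcAltPrefixes
          (PySem.Str.slice x none (some (-(PySem.Str.len suf)))) = none := by
        rw [PySem.List.index?_eq_none_iff]
        intro hmem
        apply hsuf.2 _ hmem
        apply String.toList_injective
        rw [String.toList_append, hstem, hp]
      simp only [tcAltRankLoop, hend, if_true, hidx]
      exact ih (si + 1) hrest
    · simp only [tcAltRankLoop, hend, if_false, Bool.false_eq_true]
      exact ih (si + 1) hrest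

theorem rank_eq (x : String) : pvSortlist.getD x (-1) = tcAltRank x := by
  by_cases hx : x ∈ pvNames
  · simp only [pvNames, List.mem_flatMap, List.mem_map] at hx
    obtain ⟨suf, hsuf, pre, hpre, rfl⟩ := hx
    fin_cases hsuf <;> fin_cases hpre <;> decide
  · rw [lookup_of_not_mem x hx]
    rw [show tcAltRank x = tcAltRankLoop x 0 tcAltSuffixes from rfl]
    refine (rankLoop_none x tcAltSuffixes 0 ?_).symm
    intro suf hsuf
    refine ⟨by fin_cases hsuf <;> decide, fun pre hpre he => hx ?_⟩
    rw [he]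
    simp only [pvNames, List.mem_flatMap, List.mem_map]
    exact ⟨suf, hsuf, pre, hpre, rfl⟩

-- ===== VERDICT (by name: the statement is the Claim_ definition above) =====
theorem taxon_cmp_spec : Claim_equal_taxon_cmp := by
  intro a b _
  unfold Spec_taxon_cmp
  rw [taxon_cmp_eq a b, rank_eq a, rank_eq b]
  rfl
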